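-- pv_equiv track=rewrite | github.com/kt0ns/-course-1-ITMO | 1sem/discrete math/lab_1/solutions/H.py | generate_carry_bit_formula
-- ===== SOURCE A (Python) =====
-- def nand(a, b):
--
--     return f"({a}|{b})"
--
-- def generate_carry_bit_formula(N):
--     if N == 1:
--         return nand(nand("A0", "B0"), nand("A0", "B0"))
--
--     carry = generate_carry_bit_formula(N - 1)
--
--     Ai = f"A{N - 1}"
--     Bi = f"B{N - 1}"
--
--     x_n12 = nand(Ai, Bi)
--     Ai = nand(Ai, Ai)
--     Bi = nand(Bi, Bi)
--     x_n11 = nand(Ai, Bi)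
--     x_n1 = nand(carry, x_n11)
--     next = nand(x_n1, x_n12)
--
--     return next
-- ===== SOURCE B (Python) =====
-- def nand(a, b):
--     return f"({a}|{b})"
--
-- def generate_carry_bit_formula(N):
--     carry = nand(nand("A0", "B0"), nand("A0", "B0"))
--     for i in range(2, N + 1):
--         Ai = f"A{i - 1}"
--         Bi = f"B{i - 1}"
--         carry = nand(nand(carry, nand(nand(Ai, Ai), nand(Bi, Bi))), nand(Ai, Bi))
--     return carry
-- ===== Notes on version B (the rewrite author's own statement) =====
-- stated objective: simpler
-- what changed: Replaces A's top-down recursion over N with a single bottom-up accumulating for-loop over the bit levels 2..N, keeping only the current carry formula string (no call stack, no recursion limit).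
import Mathlib
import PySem

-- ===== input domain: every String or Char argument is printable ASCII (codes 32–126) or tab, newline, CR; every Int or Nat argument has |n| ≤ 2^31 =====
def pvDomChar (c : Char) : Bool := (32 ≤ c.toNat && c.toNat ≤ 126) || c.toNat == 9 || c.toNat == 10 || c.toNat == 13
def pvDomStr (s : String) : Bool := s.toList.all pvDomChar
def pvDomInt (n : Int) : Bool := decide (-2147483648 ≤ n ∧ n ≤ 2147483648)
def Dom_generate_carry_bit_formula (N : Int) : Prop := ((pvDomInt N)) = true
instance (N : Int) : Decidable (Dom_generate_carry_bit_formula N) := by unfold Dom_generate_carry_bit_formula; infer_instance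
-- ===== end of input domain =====

-- B replaces A's top-down recursion with one bottom-up accumulating loop over the levels (simpler; return value only).

-- ===== PORT A =====
def pyNand (a b : String) : String := "(" ++ a ++ "|" ++ b ++ ")"

-- A's recursion on Int N, run with fuel (N-1).toNat; zero fuel is the base case of the recursion,
-- so this is exact on all of Pre_ (below Pre_ the Python recurses without reaching a base case).
def genA_go : Nat → Int → String
  | 0, _ => pyNand (pyNand "A0" "B0") (pyNand "A0" "B0")
  | fuel + 1, N =>
      let carry := genA_go fuel (N - 1)
      let Ai := "A" ++ PySem.Int.toStr (N - 1)
      let Bi := "B" ++ PySem.Int.toStr (N - 1)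
      let x_n12 := pyNand Ai Bi
      let Ai' := pyNand Ai Ai
      let Bi' := pyNand Bi Bi
      let x_n11 := pyNand Ai' Bi'
      let x_n1 := pyNand carry x_n11
      pyNand x_n1 x_n12

def generate_carry_bit_formula (N : Int) : String := genA_go (N - 1).toNat N

-- ===== PORT B =====
def genB_step (carry : String) (i : Int) : String :=
  let Ai := "A" ++ PySem.Int.toStr (i - 1)
  let Bi := "B" ++ PySem.Int.toStr (i - 1)
  pyNand (pyNand carry (pyNand (pyNand Ai Ai) (pyNand Bi Bi))) (pyNand Ai Bi)

def generate_carry_bit_formula_alt (N : Int) : String :=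
  (PySem.List.pyRange 2 (N + 1) 1).foldl genB_step
    (pyNand (pyNand "A0" "B0") (pyNand "A0" "B0"))

-- ===== PRECONDITION & SPEC =====
-- Pre_ excludes N < 1, on which Python A recurses without a base case and raises RecursionError.
def Pre_generate_carry_bit_formula (N : Int) : Prop := 1 ≤ N
instance (N : Int) : Decidable (Pre_generate_carry_bit_formula N) := by unfold Pre_generate_carry_bit_formula; infer_instance
def pvWitness_generate_carry_bit_formula : Int := (3)

def Spec_generate_carry_bit_formula (N : Int) (out : String) : Prop := out = generate_carry_bit_formula_alt N
instance (N : Int) (out : String) : Decidable (Spec_generate_carry_bit_formula N out) := by unfold Spec_generate_carry_bit_formula; infer_instance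

-- ===== CLAIM (what is proved, stated in full; the proofs are below) =====
def Claim_equal_generate_carry_bit_formula : Prop := ∀ (N : Int), Dom_generate_carry_bit_formula N → Pre_generate_carry_bit_formula N → Spec_generate_carry_bit_formula N (generate_carry_bit_formula N)

-- ===== LEMMAS AND PROOFS =====
lemma genA_eq_fold (n : Nat) : ∀ (N : Int), N = (n : Int) + 1 →
    genA_go n N = generate_carry_bit_formula_alt N := by
  induction n with
  | zero =>
      intro N hN; subst hN
      simp [genA_go, generate_carry_bit_formula_alt]
  | succ n ih =>
      intro N hN
      have h2 : (2 : Int) ≤ N := by omega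
      have hsplit : PySem.List.pyRange 2 (N + 1) 1
          = PySem.List.pyRange 2 N 1 ++ [N] := by
        have := PySem.List.pyRange_one_succ_right (a := 2) (b := N) (by omega)
        simpa using this
      have ihN : genA_go n (N - 1) = generate_carry_bit_formula_alt (N - 1) := by
        apply ih; omega
      have hrange : PySem.List.pyRange 2 ((N - 1) + 1) 1 = PySem.List.pyRange 2 N 1 := by
        norm_num
      simp only [genA_go, generate_carry_bit_formula_alt, hsplit, List.foldl_append,
        List.foldl_cons, List.foldl_nil]
      rw [ihN]
      simp only [generate_carry_bit_formula_alt, hrange, genB_step]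

-- ===== VERDICT (by name: the statement is the Claim_ definition above) =====
theorem generate_carry_bit_formula_spec : Claim_equal_generate_carry_bit_formula := by
  intro N _ hPre
  have h1 : 1 ≤ N := hPre
  unfold Spec_generate_carry_bit_formula generate_carry_bit_formula
  have h : N = ((N - 1).toNat : Int) + 1 := by omega
  exact genA_eq_fold (N - 1).toNat N h
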